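-- pv_equiv track=rewrite | github.com/UdeS-CoBIUS/DoubleRecViz | utils/SHT/labelExons.py | defineEvent5
-- ===== SOURCE A (Python) =====
-- def defineEvent5(transcrit):
-- 	cprime = 0
-- 	for o in transcrit:
-- 		if o == '-' :
-- 			cprime += 1
-- 		else:
-- 			break
-- 	return True if cprime > 0 else False
-- ===== SOURCE B (Python) =====
-- def defineEvent5(transcrit):
-- 	return bool(transcrit) and transcrit[0] == '-'
-- ===== Notes on version B (the rewrite author's own statement) =====
-- stated objective: simpler
-- what changed: Replaces the count-leading-dashes loop (with break and a counter compared to 0) by a direct O(1) check of the first character after an emptiness guard.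
import Mathlib
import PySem

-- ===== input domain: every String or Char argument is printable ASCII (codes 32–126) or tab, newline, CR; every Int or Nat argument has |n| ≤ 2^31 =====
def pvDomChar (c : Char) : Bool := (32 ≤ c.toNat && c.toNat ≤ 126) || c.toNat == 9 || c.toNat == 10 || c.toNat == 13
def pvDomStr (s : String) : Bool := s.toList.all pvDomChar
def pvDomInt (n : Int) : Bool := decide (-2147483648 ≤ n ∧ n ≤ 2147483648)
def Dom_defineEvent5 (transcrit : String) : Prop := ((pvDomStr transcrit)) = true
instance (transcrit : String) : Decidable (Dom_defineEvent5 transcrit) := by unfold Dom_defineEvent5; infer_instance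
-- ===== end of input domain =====

-- B replaces A's counting loop by a direct first-character check (simpler, O(1)).


-- ===== PORT A =====
-- loop: for o in transcrit: if o == '-': cprime += 1 else: break;  return cprime > 0
def defineEvent5_loop (cs : List Char) (cprime : Nat) : Nat :=
  match cs with
  | [] => cprime
  | o :: rest => if o = '-' then defineEvent5_loop rest (cprime + 1) else cprime

def defineEvent5 (transcrit : String) : Bool :=
  let cprime := defineEvent5_loop transcrit.toList 0
  if cprime > 0 then true else false

-- ===== PORT B =====
-- bool(transcrit) and transcrit[0] == '-'
def defineEvent5_alt (transcrit : String) : Bool :=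
  match transcrit.toList with
  | [] => false
  | c :: _ => c = '-'

-- ===== PRECONDITION & SPEC =====
def Spec_defineEvent5 (transcrit : String) (out : Bool) : Prop := out = defineEvent5_alt transcrit
instance (transcrit : String) (out : Bool) : Decidable (Spec_defineEvent5 transcrit out) := by unfold Spec_defineEvent5; infer_instance

-- ===== CLAIM (what is proved, stated in full; the proofs are below) =====
def Claim_equal_defineEvent5 : Prop := ∀ (transcrit : String), Dom_defineEvent5 transcrit → Spec_defineEvent5 transcrit (defineEvent5 transcrit)

-- ===== LEMMAS AND PROOFS =====

-- ===== VERDICT (by name: the statement is the Claim_ definition above) =====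
theorem defineEvent5_spec : Claim_equal_defineEvent5 := by
  intro transcrit _
  unfold Spec_defineEvent5 defineEvent5 defineEvent5_alt
  cases h : transcrit.toList with
  | nil => simp [defineEvent5_loop]
  | cons c rest =>
    by_cases hc : c = '-'
    · simp [defineEvent5_loop, hc]
      have : ∀ (cs : List Char) (n : Nat), n ≤ defineEvent5_loop cs n := by
        intro cs
        induction cs with
        | nil => intro n; simp [defineEvent5_loop]
        | cons o r ih =>
          intro n
          unfold defineEvent5_loop
          split
          · exact le_trans (Nat.le_succ n) (ih (n+1))
          · exact le_refl n
      exact Nat.lt_of_lt_of_le Nat.zero_lt_one (this rest 1)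
    · simp [defineEvent5_loop, hc]
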